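-- pv_equiv track=rewrite | github.com/Wizc1998/realization-of-SON-Algorithm-using-the-Spark-Framework | task2.py | filter_with_support
-- ===== SOURCE A (Python) =====
-- def filter_with_support(k_tuples_list, partition_sets, adj_threshhold):
--
--
--     support_compare_dict = {}
--
--
--     for k_tuple in k_tuples_list:
--
--         support_count = 0
--         for basket in partition_sets:
--
--             if k_tuple.issubset(basket):
--                 support_count+=1
--
--         k_tuple = tuple(k_tuple)
--         if k_tuple not in support_compare_dict:
--             support_compare_dict[k_tuple] = support_count
--         else:
--             support_compare_dict[k_tuple] = 'error_evidence: repeated value'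
--
--
--     filtered_list = []
--     for k,v in support_compare_dict.items():
--         if v >= adj_threshhold:
--             filtered_tuple = set(k)
--             filtered_list.append(filtered_tuple)
--
--     return filtered_list
-- ===== SOURCE B (Python) =====
-- def filter_with_support(k_tuples_list, partition_sets, adj_threshhold):
--     # Inverted index: item -> set of indices of the baskets containing it.
--     index = {}
--     for i, basket in enumerate(partition_sets):
--         for item in basket:
--             index.setdefault(item, set()).add(i)
--     n = len(partition_sets)
--     empty = frozenset()
--     filtered_list = []
--     for k_tuple in k_tuples_list:
--         ids = None
--         for item in k_tuple:
--             post = index.get(item, empty)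
--             ids = post if ids is None else ids & post
--         support = n if ids is None else len(ids)
--         if support >= adj_threshhold:
--             filtered_list.append(set(k_tuple))
--     return filtered_list
-- ===== Notes on version B (the rewrite author's own statement) =====
-- stated objective: alternative
-- what changed: B replaces A's per-tuple subset scan over every basket (and A's dict of tuple-keys used only to detect repeats) by an inverted index item -> set of basket indices built once, computing each tuple's support as the size of the intersection of its items' posting sets.
import Mathlib
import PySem

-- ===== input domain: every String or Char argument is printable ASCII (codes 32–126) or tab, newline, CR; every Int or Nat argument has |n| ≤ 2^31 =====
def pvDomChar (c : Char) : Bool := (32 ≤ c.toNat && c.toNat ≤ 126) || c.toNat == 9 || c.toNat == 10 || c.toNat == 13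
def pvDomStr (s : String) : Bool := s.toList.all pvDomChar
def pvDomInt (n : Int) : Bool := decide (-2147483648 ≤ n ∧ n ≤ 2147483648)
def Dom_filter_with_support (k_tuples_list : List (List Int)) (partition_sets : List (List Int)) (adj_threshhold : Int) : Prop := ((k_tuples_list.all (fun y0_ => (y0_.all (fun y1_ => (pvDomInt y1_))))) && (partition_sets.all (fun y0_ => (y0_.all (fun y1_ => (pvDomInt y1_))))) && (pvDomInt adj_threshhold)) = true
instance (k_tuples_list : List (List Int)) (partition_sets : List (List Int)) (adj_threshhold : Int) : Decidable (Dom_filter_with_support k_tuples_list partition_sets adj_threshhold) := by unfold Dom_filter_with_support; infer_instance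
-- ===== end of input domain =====

-- B replaces A's per-tuple scan over all baskets by an inverted index item → set of basket
-- indices built once, a tuple's support being the size of the intersection of its items'
-- posting sets (objective: alternative algorithm; k_tuples are Python sets = distinct lists).

-- ===== PORT A =====
-- support_count loop: 'for basket in partition_sets: if k_tuple.issubset(basket): support_count += 1'
def pvCountA (partition_sets : List (List Int)) (k_tuple : List Int) : Int :=
  partition_sets.foldl
    (fun c basket => if PySem.Set.issubset (PySem.Set.ofList k_tuple) basket then c + 1 else c) 0

-- the dict loop; value 'none' models the string 'error_evidence: repeated value' assigned on a
-- repeated key — Python later raises TypeError comparing it with the threshold (outside Pre_)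
def pvDictA (k_tuples_list partition_sets : List (List Int)) : PySem.Dict (List Int) (Option Int) :=
  k_tuples_list.foldl
    (fun d k_tuple =>
      if d.contains (PySem.Set.ofList k_tuple)
      then d.insert (PySem.Set.ofList k_tuple) none
      else d.insert (PySem.Set.ofList k_tuple) (some (pvCountA partition_sets k_tuple)))
    PySem.Dict.empty

def filter_with_support (k_tuples_list : List (List Int)) (partition_sets : List (List Int)) (adj_threshhold : Int) : List (List Int) :=
  (pvDictA k_tuples_list partition_sets).items.foldl
    (fun acc kv =>
      match kv.2 with
      | some v => if v ≥ adj_threshhold then acc ++ [PySem.Set.ofList kv.1] else acc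
      | none => acc)   -- in Python this branch raises TypeError; unreachable under Pre_
    []

-- ===== PORT B =====
-- 'for i, basket in enumerate(partition_sets): for item in basket: index.setdefault(item, set()).add(i)'
def pvIndexB (partition_sets : List (List Int)) : PySem.Dict Int (PySem.Set Int) :=
  (PySem.List.enumerate partition_sets 0).foldl
    (fun d ib =>
      ib.2.foldl (fun d item => d.modify item PySem.Set.empty (fun s => PySem.Set.add s ib.1)) d)
    PySem.Dict.empty

-- 'ids = None; for item in k_tuple: post = index.get(item, empty); ids = post if ids is None else ids & post'
def pvIdsB (index : PySem.Dict Int (PySem.Set Int)) (k_tuple : List Int) : Option (PySem.Set Int) :=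
  k_tuple.foldl
    (fun acc item =>
      match acc with
      | none => some (index.getD item PySem.Set.empty)
      | some s => some (PySem.Set.inter s (index.getD item PySem.Set.empty)))
    none

def filter_with_support_alt (k_tuples_list : List (List Int)) (partition_sets : List (List Int)) (adj_threshhold : Int) : List (List Int) :=
  let index := pvIndexB partition_sets
  let n : Int := (partition_sets.length : Int)
  k_tuples_list.foldl
    (fun acc k_tuple =>
      let support : Int :=
        match pvIdsB index k_tuple with
        | none => n
        | some s => PySem.Set.len s
      if support ≥ adj_threshhold then acc ++ [PySem.Set.ofList k_tuple] else acc)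
    []

-- ===== PRECONDITION & SPEC =====
-- Pre_ excludes exactly the inputs where A raises: a repeated k_tuple (equal as a set) makes A
-- store the string 'error_evidence: repeated value' and then raise TypeError comparing it to the threshold.
def Pre_filter_with_support (k_tuples_list : List (List Int)) (partition_sets : List (List Int)) (adj_threshhold : Int) : Prop :=
  List.Pairwise (fun a b => PySem.Set.equal (PySem.Set.ofList a) (PySem.Set.ofList b) = false) k_tuples_list
instance (k_tuples_list : List (List Int)) (partition_sets : List (List Int)) (adj_threshhold : Int) : Decidable (Pre_filter_with_support k_tuples_list partition_sets adj_threshhold) := by unfold Pre_filter_with_support; infer_instance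

def pvWitness_filter_with_support : List (List Int) × List (List Int) × Int := ([[1, 2], [2]], [[1, 2, 3], [2]], 1)

def Spec_filter_with_support (k_tuples_list : List (List Int)) (partition_sets : List (List Int)) (adj_threshhold : Int) (out : List (List Int)) : Prop := out = filter_with_support_alt k_tuples_list partition_sets adj_threshhold
instance (k_tuples_list : List (List Int)) (partition_sets : List (List Int)) (adj_threshhold : Int) (out : List (List Int)) : Decidable (Spec_filter_with_support k_tuples_list partition_sets adj_threshhold out) := by unfold Spec_filter_with_support; infer_instance

-- ===== CLAIM (what is proved, stated in full; the proofs are below) =====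
def Claim_equal_filter_with_support : Prop := ∀ (k_tuples_list : List (List Int)) (partition_sets : List (List Int)) (adj_threshhold : Int), Dom_filter_with_support k_tuples_list partition_sets adj_threshhold → Pre_filter_with_support k_tuples_list partition_sets adj_threshhold → Spec_filter_with_support k_tuples_list partition_sets adj_threshhold (filter_with_support k_tuples_list partition_sets adj_threshhold)

-- ===== LEMMAS AND PROOFS =====

-- A's dict loop over pairwise-distinct fresh keys appends (key, some count) in order
theorem pvDictA_items (partition_sets : List (List Int)) :
    ∀ (kts : List (List Int)) (d : PySem.Dict (List Int) (Option Int)),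
      (∀ kt ∈ kts, d.contains (PySem.Set.ofList kt) = false) →
      List.Pairwise (fun a b => PySem.Set.ofList a ≠ PySem.Set.ofList b) kts →
      (kts.foldl
        (fun d k_tuple =>
          if d.contains (PySem.Set.ofList k_tuple)
          then d.insert (PySem.Set.ofList k_tuple) none
          else d.insert (PySem.Set.ofList k_tuple) (some (pvCountA partition_sets k_tuple)))
        d).items
      = d.items ++ kts.map (fun kt => (PySem.Set.ofList kt, some (pvCountA partition_sets kt))) := by
  intro kts
  induction kts with
  | nil => intro d _ _; simp
  | cons kt rest ih =>
    intro d hfresh hp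
    have hp1 := List.pairwise_cons.mp hp
    have h0 : d.contains (PySem.Set.ofList kt) = false := hfresh kt (by simp)
    simp only [List.foldl_cons, h0, Bool.false_eq_true, if_false]
    rw [ih (d.insert (PySem.Set.ofList kt) (some (pvCountA partition_sets kt))) ?_ hp1.2]
    · rw [PySem.Dict.items_insert_of_not_contains _ _ h0]
      simp
    · intro kt' hkt'
      rw [PySem.Dict.contains_insert]
      have hne : PySem.Set.ofList kt' ≠ PySem.Set.ofList kt := fun h => hp1.1 kt' hkt' h.symm
      simp [hne, hfresh kt' (List.mem_cons_of_mem _ hkt')]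

-- basket-item inner loop of the index build
theorem pvIndexB_inner (i : Int) :
    ∀ (basket : List Int) (d : PySem.Dict Int (PySem.Set Int)) (k : Int),
      (basket.foldl (fun d item => d.modify item PySem.Set.empty (fun s => PySem.Set.add s i)) d).getD k PySem.Set.empty
      = if k ∈ basket then PySem.Set.add (d.getD k PySem.Set.empty) i else d.getD k PySem.Set.empty := by
  intro basket
  induction basket with
  | nil => intro d k; simp
  | cons b bs ih =>
    intro d k
    simp only [List.foldl_cons]
    rw [ih, PySem.Dict.getD_modify]
    by_cases hk : k = b
    · subst hk
      by_cases hm : k ∈ bs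
      · have : k ∈ k :: bs := by simp
        simp only [hm, this, if_pos]
        exact PySem.Set.add_of_mem ((PySem.Set.mem_add _ _ _).mpr (Or.inr rfl))
      · simp [hm]
    · simp [hk, List.mem_cons]

-- the posting list of k: indices of the baskets containing k, in order
def pvPostings (partition_sets : List (List Int)) (k : Int) : List Int :=
  ((PySem.List.enumerate partition_sets 0).filter (fun p => decide (k ∈ p.2))).map (fun p => p.1)

theorem pvIndexB_outer :
    ∀ (l : List (Int × List Int)) (d : PySem.Dict Int (PySem.Set Int)),
      List.Pairwise (fun a b => a.1 ≠ b.1) l →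
      (∀ p ∈ l, ∀ k : Int, p.1 ∉ d.getD k PySem.Set.empty) →
      ∀ k, (l.foldl
              (fun d ib => ib.2.foldl (fun d item => d.modify item PySem.Set.empty (fun s => PySem.Set.add s ib.1)) d)
              d).getD k PySem.Set.empty
            = d.getD k PySem.Set.empty ++ (l.filter (fun p => decide (k ∈ p.2))).map (fun p => p.1) := by
  intro l
  induction l with
  | nil => intro d _ _ k; simp
  | cons p rest ih =>
    intro d hp hfresh k
    have hp1 := List.pairwise_cons.mp hp
    have hfresh' : ∀ q ∈ rest, ∀ k' : Int,
        q.1 ∉ (p.2.foldl (fun d item => d.modify item PySem.Set.empty (fun s => PySem.Set.add s p.1)) d).getD k' PySem.Set.empty := by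
      intro q hq k'
      rw [pvIndexB_inner]
      by_cases h2 : k' ∈ p.2
      · rw [if_pos h2]
        intro hmem
        rcases (PySem.Set.mem_add _ _ _).mp hmem with h | h
        · exact hfresh q (List.mem_cons_of_mem _ hq) k' h
        · exact hp1.1 q hq h.symm
      · rw [if_neg h2]
        exact hfresh q (List.mem_cons_of_mem _ hq) k'
    simp only [List.foldl_cons]
    rw [ih _ hp1.2 hfresh' k, pvIndexB_inner]
    by_cases hm : k ∈ p.2
    · rw [if_pos hm, List.filter_cons_of_pos (by simpa using hm),
         PySem.Set.add_of_not_mem (hfresh p (by simp) k)]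
      simp
    · rw [if_neg hm, List.filter_cons_of_neg (by simpa using hm)]

theorem pvIndexB_getD (partition_sets : List (List Int)) (k : Int) :
    (pvIndexB partition_sets).getD k PySem.Set.empty = pvPostings partition_sets k := by
  unfold pvIndexB pvPostings
  rw [pvIndexB_outer _ _ ((PySem.List.pairwise_lt_enumerate _ _).imp (fun h => ne_of_lt h))
      (by intro p _ k'; simp [PySem.Set.empty])]
  simp [PySem.Set.empty]

theorem pvEnum_fst_inj {pss : List (List Int)} {p q : Int × List Int}
    (hp : p ∈ PySem.List.enumerate pss 0) (hq : q ∈ PySem.List.enumerate pss 0)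
    (h : p.1 = q.1) : p = q := by
  rcases (PySem.List.mem_enumerate_iff _ _ _).mp hp with ⟨a, ha, rfl⟩
  rcases (PySem.List.mem_enumerate_iff _ _ _).mp hq with ⟨b, hb, hqq⟩
  rw [hqq] at h ⊢
  simp only at h
  have : a = b := by omega
  subst this
  rfl

theorem pvNodup_map_fst_filter (pss : List (List Int)) (P : Int × List Int → Bool) :
    (((PySem.List.enumerate pss 0).filter P).map (fun p => p.1)).Nodup := by
  have h1 : ((PySem.List.enumerate pss 0).filter P).Pairwise (fun a b => a.1 < b.1) :=
    (PySem.List.pairwise_lt_enumerate _ _).filter P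
  simpa [List.Nodup, List.pairwise_map] using h1.imp (fun h => ne_of_lt h)

theorem pvFold_inter (index : PySem.Dict Int (PySem.Set Int)) :
    ∀ (kt : List Int) (s : PySem.Set Int), s.Nodup →
      ∃ t : PySem.Set Int,
        kt.foldl
          (fun acc item =>
            match acc with
            | none => some (index.getD item PySem.Set.empty)
            | some s => some (PySem.Set.inter s (index.getD item PySem.Set.empty)))
          (some s) = some t
        ∧ t.Nodup
        ∧ ∀ i, i ∈ t ↔ (i ∈ s ∧ ∀ x ∈ kt, i ∈ index.getD x PySem.Set.empty) := by
  intro kt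
  induction kt with
  | nil => intro s hs; exact ⟨s, rfl, hs, by simp⟩
  | cons x rest ih =>
    intro s hs
    simp only [List.foldl_cons]
    obtain ⟨t, h1, h2, h3⟩ :=
      ih (PySem.Set.inter s (index.getD x PySem.Set.empty)) (PySem.Set.nodup_inter _ _ hs)
    refine ⟨t, h1, h2, fun i => ?_⟩
    rw [h3 i, PySem.Set.mem_inter]
    simp only [List.forall_mem_cons]
    tauto

theorem pvLen_filter_enum (P : List Int → Bool) :
    ∀ (pss : List (List Int)) (s : Int),
      ((PySem.List.enumerate pss s).filter (fun p => P p.2)).length = pss.countP P := by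
  intro pss
  induction pss with
  | nil => intro s; simp [PySem.List.enumerate_nil]
  | cons b rest ih =>
    intro s
    rw [PySem.List.enumerate_cons, List.filter_cons, List.countP_cons]
    cases hb : P b <;> simp [hb, ih (s + 1)]

theorem pvIssubset_all (kt b : List Int) :
    PySem.Set.issubset (PySem.Set.ofList kt) b = kt.all (fun y => decide (y ∈ b)) := by
  rw [Bool.eq_iff_iff]
  simp [PySem.Set.issubset_iff, PySem.Set.mem_ofList, List.all_eq_true]

theorem pvCountA_eq (pss : List (List Int)) (kt : List Int) :
    pvCountA pss kt = (pss.countP (fun b => kt.all (fun y => decide (y ∈ b))) : Int) := by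
  unfold pvCountA
  rw [PySem.List.foldl_if_add_one]
  have hf : List.countP (PySem.Set.ofList kt).issubset pss
      = List.countP (fun b => kt.all (fun y => decide (y ∈ b))) pss :=
    List.countP_congr (fun b _ => by rw [pvIssubset_all])
  simp [hf]

-- B's per-tuple support equals A's per-tuple count
theorem pvSupport_eq (partition_sets : List (List Int)) (kt : List Int) :
    (match pvIdsB (pvIndexB partition_sets) kt with
     | none => (partition_sets.length : Int)
     | some s => PySem.Set.len s) = pvCountA partition_sets kt := by
  cases kt with
  | nil =>
    show (partition_sets.length : Int) = pvCountA partition_sets []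
    rw [pvCountA_eq]
    simp
  | cons x rest =>
    have hred : pvIdsB (pvIndexB partition_sets) (x :: rest)
        = rest.foldl
            (fun acc item =>
              match acc with
              | none => some ((pvIndexB partition_sets).getD item PySem.Set.empty)
              | some s => some (PySem.Set.inter s ((pvIndexB partition_sets).getD item PySem.Set.empty)))
            (some ((pvIndexB partition_sets).getD x PySem.Set.empty)) := rfl
    obtain ⟨t, h1, h2, h3⟩ :=
      pvFold_inter (pvIndexB partition_sets) rest
        ((pvIndexB partition_sets).getD x PySem.Set.empty)
        (by rw [pvIndexB_getD]; exact pvNodup_map_fst_filter _ _)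
    show (match pvIdsB (pvIndexB partition_sets) (x :: rest) with
      | none => ((partition_sets.length : Int))
      | some s => PySem.Set.len s) = pvCountA partition_sets (x :: rest)
    rw [hred, h1]
    show PySem.Set.len t = pvCountA partition_sets (x :: rest)
    simp only [pvIndexB_getD] at h3
    have hgoodnd := pvNodup_map_fst_filter partition_sets
      (fun p => (x :: rest).all (fun y => decide (y ∈ p.2)))
    have hmem : ∀ i, i ∈ t ↔ i ∈ ((PySem.List.enumerate partition_sets 0).filter
        (fun p => (x :: rest).all (fun y => decide (y ∈ p.2)))).map (fun p => p.1) := by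
      intro i
      rw [h3 i]
      constructor
      · rintro ⟨hx, hall⟩
        obtain ⟨p, ⟨hp, hkp⟩, rfl⟩ :
            ∃ p, (p ∈ PySem.List.enumerate partition_sets 0 ∧ x ∈ p.2) ∧ p.1 = i := by
          simpa [pvPostings, List.mem_map, List.mem_filter] using hx
        refine List.mem_map.mpr ⟨p, List.mem_filter.mpr ⟨hp, ?_⟩, rfl⟩
        simp only [List.all_cons, Bool.and_eq_true, decide_eq_true_eq, List.all_eq_true]
        refine ⟨hkp, fun y hy => ?_⟩
        obtain ⟨q, ⟨hq, hkq⟩, hq1⟩ :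
            ∃ q, (q ∈ PySem.List.enumerate partition_sets 0 ∧ y ∈ q.2) ∧ q.1 = p.1 := by
          simpa [pvPostings, List.mem_map, List.mem_filter] using hall y hy
        have : q = p := pvEnum_fst_inj hq hp hq1
        subst this
        simpa using hkq
      · intro hg
        obtain ⟨p, hpf, rfl⟩ := List.mem_map.mp hg
        obtain ⟨hp, hall⟩ := List.mem_filter.mp hpf
        simp only [List.all_cons, Bool.and_eq_true, decide_eq_true_eq, List.all_eq_true] at hall
        constructor
        · simp only [pvPostings, List.mem_map, List.mem_filter]
          exact ⟨p, ⟨hp, by simpa using hall.1⟩, rfl⟩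
        · intro y hy
          simp only [pvPostings, List.mem_map, List.mem_filter]
          exact ⟨p, ⟨hp, by simpa using hall.2 y hy⟩, rfl⟩
    have hlen : t.length = (((PySem.List.enumerate partition_sets 0).filter
        (fun p => (x :: rest).all (fun y => decide (y ∈ p.2)))).map (fun p => p.1)).length :=
      ((List.perm_ext_iff_of_nodup h2 hgoodnd).mpr hmem).length_eq
    rw [List.length_map] at hlen
    have hcnt := pvLen_filter_enum (fun b => (x :: rest).all (fun y => decide (y ∈ b))) partition_sets 0
    rw [pvCountA_eq]
    simp only [PySem.Set.len, hlen, hcnt]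


theorem filter_with_support_spec : Claim_equal_filter_with_support := by
  intro ktl pss thr _ hpre
  unfold Spec_filter_with_support filter_with_support filter_with_support_alt pvDictA
  have hpair : List.Pairwise (fun a b => PySem.Set.ofList a ≠ PySem.Set.ofList b) ktl := by
    refine hpre.imp ?_
    intro a b h heq
    have ht : PySem.Set.equal (PySem.Set.ofList b) (PySem.Set.ofList b) = true :=
      (PySem.Set.equal_iff _ _).mpr (fun x => Iff.rfl)
    rw [heq] at h
    simp [ht] at h
  rw [pvDictA_items pss ktl PySem.Dict.empty
      (by intro kt _; exact PySem.Dict.contains_empty _) hpair]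
  have hemp : (PySem.Dict.empty : PySem.Dict (List Int) (Option Int)).items = [] := rfl
  rw [hemp, List.nil_append, List.foldl_map]
  refine PySem.List.foldl_congr_mem _ _ _ _ ?_
  intro acc kt _
  show (if pvCountA pss kt ≥ thr then acc ++ [PySem.Set.ofList (PySem.Set.ofList kt)] else acc) = _
  rw [PySem.Set.ofList_ofList, ← pvSupport_eq pss kt]
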